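-- pv_equiv track=rewrite | github.com/Cjrsw/kms | embedding-service/app/main.py | _candidate_hf_endpoints
-- ===== SOURCE A (Python) =====
-- def _candidate_hf_endpoints(current: str | None) -> list[str | None]:
--     candidates: list[str | None] = []
--     normalized_current = (current or "").strip()
--     if normalized_current:
--         candidates.append(normalized_current)
--     candidates.extend(["https://huggingface.co", "https://hf-mirror.com", None])
--     deduped: list[str | None] = []
--     for item in candidates:
--         if item not in deduped:
--             deduped.append(item)
--     return deduped
-- ===== SOURCE B (Python) =====
-- HF = "https://huggingface.co"
-- MIRROR = "https://hf-mirror.com"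
--
-- def _candidate_hf_endpoints(current):
--     # Closed-form case table: the constants are fixed and distinct, so the
--     # result is one of four literal lists determined by what `current` strips to.
--     cur = (current or "").strip()
--     if cur == "" or cur == HF:
--         return [HF, MIRROR, None]
--     if cur == MIRROR:
--         return [MIRROR, HF, None]
--     return [cur, HF, MIRROR, None]
-- ===== Notes on version B (the rewrite author's own statement) =====
-- stated objective: simpler
-- what changed: Replaces the append-then-dedup loop with a closed-form case table: the stripped input is compared against the two known constants and one of four literal result lists is returned; no list is built incrementally and no membership test or dedup pass exists.
import Mathlib
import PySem

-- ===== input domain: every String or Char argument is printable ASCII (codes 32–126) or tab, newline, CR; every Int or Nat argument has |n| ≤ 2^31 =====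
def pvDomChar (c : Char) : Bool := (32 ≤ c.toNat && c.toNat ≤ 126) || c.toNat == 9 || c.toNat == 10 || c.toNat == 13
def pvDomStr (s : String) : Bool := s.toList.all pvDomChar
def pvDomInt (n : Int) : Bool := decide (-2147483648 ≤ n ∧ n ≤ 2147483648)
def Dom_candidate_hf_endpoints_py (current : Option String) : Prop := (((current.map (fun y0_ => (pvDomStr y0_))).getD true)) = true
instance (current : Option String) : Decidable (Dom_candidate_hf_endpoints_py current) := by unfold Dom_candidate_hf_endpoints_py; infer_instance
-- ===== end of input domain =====

-- B replaces A's append-then-dedup loop with a closed-form case table over the stripped input (simpler).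

-- ===== PORT A =====
-- Literal port of A: append normalized current (if truthy), extend with constants, then dedup loop.
def candidate_hf_endpoints_py (current : Option String) : List (Option String) :=
  let normalized_current := PySem.Str.strip (current.getD "")
  let candidates : List (Option String) :=
    (if normalized_current ≠ "" then [some normalized_current] else []) ++
      [some "https://huggingface.co", some "https://hf-mirror.com", none]
  candidates.foldl (fun deduped item => if item ∈ deduped then deduped else deduped ++ [item]) []

-- ===== PORT B =====
-- Port of B: compare the stripped input to the two constants and return one of four literal lists.
def pvHF : String := "https://huggingface.co"
def pvMirror : String := "https://hf-mirror.com"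

def candidate_hf_endpoints_py_alt (current : Option String) : List (Option String) :=
  let cur := PySem.Str.strip (current.getD "")
  if cur = "" ∨ cur = pvHF then [some pvHF, some pvMirror, none]
  else if cur = pvMirror then [some pvMirror, some pvHF, none]
  else [some cur, some pvHF, some pvMirror, none]

-- ===== PRECONDITION & SPEC =====
def Spec_candidate_hf_endpoints_py (current : Option String) (out : List (Option String)) : Prop := out = candidate_hf_endpoints_py_alt current
instance (current : Option String) (out : List (Option String)) : Decidable (Spec_candidate_hf_endpoints_py current out) := by unfold Spec_candidate_hf_endpoints_py; infer_instance

-- ===== CLAIM =====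
def Claim_equal_candidate_hf_endpoints_py : Prop := ∀ (current : Option String), Dom_candidate_hf_endpoints_py current → Spec_candidate_hf_endpoints_py current (candidate_hf_endpoints_py current)

-- ===== LEMMAS AND PROOFS =====

-- ===== VERDICT =====
theorem candidate_hf_endpoints_py_spec : Claim_equal_candidate_hf_endpoints_py := by
  intro current _
  unfold Spec_candidate_hf_endpoints_py candidate_hf_endpoints_py candidate_hf_endpoints_py_alt pvHF pvMirror
  set s := PySem.Str.strip (current.getD "") with hs
  by_cases h0 : s = ""
  · simp [h0, List.foldl]
  · by_cases h1 : s = "https://huggingface.co"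
    · simp [h1, List.foldl]
    · by_cases h2 : s = "https://hf-mirror.com"
      · simp [h2, List.foldl]
      · simp [h0, h1, h2, List.foldl, Ne.symm h1, Ne.symm h2]
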